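-- pv_equiv track=rewrite | github.com/aloksingh3112/AudioTranscriber | backend/api/validation.py | ValidateStringPausers
-- ===== SOURCE A (Python) =====
-- def ValidateStringPausers(str):
--     isValidate = True
--     for i in range(0, len(str)):
--         if(str[i] == ',' or str[i] == ";" or str[i] == ":"):
--             isLast = i == len(str) - 1
--             if (isLast):
--                 return True
--
--             isAccompaniedBySpace = str[i+1] == " "
--             isNotAccompaniedBySecondSpace = i + \
--                 2 < len(str) and str[i+2] != None and str[i+2] != " "
--
--             if not (isAccompaniedBySpace and isNotAccompaniedBySecondSpace):
--                 isValidate = False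
--                 break
--
--     return isValidate
-- ===== SOURCE B (Python) =====
-- def ValidateStringPausers(str):
--     # Staged passes: normalize all pausers to ',', split into pieces, then
--     # validate each piece that follows a pauser.
--     pieces = str.replace(';', ',').replace(':', ',').split(',')
--     last = len(pieces) - 1
--     for k in range(1, last + 1):
--         p = pieces[k]
--         if p == '':
--             ok = k == last
--         elif p == ' ':
--             ok = k < last
--         else:
--             ok = p[0] == ' ' and p[1] != ' '
--         if not ok:
--             return False
--     return True
-- ===== Notes on version B (the rewrite author's own statement) =====
-- stated objective: faster
-- what changed: Replaces A's per-character index scan (with i+1/i+2 lookahead) by staged passes: normalize the three pauser characters to one separator with replace, split the string on it, then validate each piece that follows a pauser (must start with one space then a non-space; an empty piece is allowed only in final position).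
import Mathlib
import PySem

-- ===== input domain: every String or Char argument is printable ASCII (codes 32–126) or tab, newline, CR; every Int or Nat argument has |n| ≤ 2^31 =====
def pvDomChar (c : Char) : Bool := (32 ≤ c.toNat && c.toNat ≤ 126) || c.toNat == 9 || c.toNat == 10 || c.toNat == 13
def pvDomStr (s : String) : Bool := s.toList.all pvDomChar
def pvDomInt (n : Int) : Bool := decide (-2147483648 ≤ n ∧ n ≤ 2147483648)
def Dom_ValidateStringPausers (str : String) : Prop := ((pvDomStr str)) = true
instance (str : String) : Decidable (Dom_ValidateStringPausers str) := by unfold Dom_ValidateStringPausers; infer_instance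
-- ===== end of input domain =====

-- B validates by staged passes — normalize all pausers to ',', split into pieces,
-- then check each piece that follows a pauser — instead of A's index scan (objective: alternative).

-- ===== PORT A =====
-- the loop over range(0, len(str)) with early returns; indices accessed after an
-- in-range check, so getD is exact; `str[i+2] != None` is always true and dropped
def pvALoop (cs : List Char) (i : Nat) : Bool :=
  if i < cs.length then
    if cs.getD i ' ' == ',' || cs.getD i ' ' == ';' || cs.getD i ' ' == ':' then
      if i = cs.length - 1 then true
      else
        let isAccompaniedBySpace := cs.getD (i+1) ' ' == ' '
        let isNotAccompaniedBySecondSpace := decide (i + 2 < cs.length) && (cs.getD (i+2) ' ' != ' ')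
        if !(isAccompaniedBySpace && isNotAccompaniedBySecondSpace) then false
        else pvALoop cs (i+1)
    else pvALoop cs (i+1)
  else true
termination_by cs.length - i

def ValidateStringPausers (str : String) : Bool := pvALoop str.toList 0

-- ===== PORT B =====
-- the per-piece test of Source B's loop body (p[1] is only evaluated when p[0] == ' '
-- and p ≠ ' ', so p has at least two chars and getD is exact)
def pvPieceOK (p : List Char) (isLast : Bool) : Bool :=
  if p = [] then isLast
  else if p = [' '] then !isLast
  else p.getD 0 ' ' == ' ' && p.getD 1 ' ' != ' '

-- Source B's `for k in range(1, last+1)` with early return, as recursion over the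
-- suffix of pieces (k == last  ↔  the remaining tail is empty)
def pvBLoop : List (List Char) → Bool
  | [] => true
  | p :: ps => pvPieceOK p ps.isEmpty && pvBLoop ps

def ValidateStringPausers_alt (str : String) : Bool :=
  let pieces := PySem.Chars.splitOn
    (PySem.Chars.replace (PySem.Chars.replace str.toList [';'] [',']) [':'] [',']) [',']
  pvBLoop (pieces.drop 1)

-- ===== PRECONDITION & SPEC =====
def Spec_ValidateStringPausers (str : String) (out : Bool) : Prop := out = ValidateStringPausers_alt str
instance (str : String) (out : Bool) : Decidable (Spec_ValidateStringPausers str out) := by unfold Spec_ValidateStringPausers; infer_instance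

-- ===== CLAIM (what is proved, stated in full; the proofs are below) =====
def Claim_equal_ValidateStringPausers : Prop := ∀ (str : String), Dom_ValidateStringPausers str → Spec_ValidateStringPausers str (ValidateStringPausers str)

-- ===== LEMMAS AND PROOFS =====

def pvPauser (c : Char) : Bool := c == ',' || c == ';' || c == ':'

-- splitting on the pausers, head piece and tail pieces
def pvSplit : List Char → List Char × List (List Char)
  | [] => ([], [])
  | c :: cs =>
    let r := pvSplit cs
    if pvPauser c then ([], r.1 :: r.2) else (c :: r.1, r.2)

def pvNorm (c : Char) : Char := if c = ';' then ',' else if c = ':' then ',' else c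

lemma pvReplace_go (a b : Char) : ∀ (l : List Char) (fuel : Nat) (acc : List Char),
    l.length ≤ fuel →
    PySem.Chars.replace.go [a] [b] fuel l acc
      = acc.reverse ++ l.map (fun c => if c = a then b else c) := by
  intro l
  induction l with
  | nil => intro fuel acc _; cases fuel <;> simp [PySem.Chars.replace.go]
  | cons c t ih =>
      intro fuel acc h
      cases fuel with
      | zero => simp at h
      | succ f =>
          have hlen : t.length ≤ f := by simpa using h
          by_cases hc : c = a
          · simp [PySem.Chars.replace.go, List.isPrefixOf, hc, ih f _ hlen]
          · have hc' : ¬ a = c := fun e => hc e.symm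
            simp [PySem.Chars.replace.go, List.isPrefixOf, hc, hc', ih f _ hlen]

lemma pvReplace_single (a b : Char) (s : List Char) :
    PySem.Chars.replace s [a] [b] = s.map (fun c => if c = a then b else c) := by
  simp [PySem.Chars.replace, pvReplace_go a b s s.length [] le_rfl]

lemma pvNorm_map (s : List Char) :
    PySem.Chars.replace (PySem.Chars.replace s [';'] [',']) [':'] [','] = s.map pvNorm := by
  rw [pvReplace_single, pvReplace_single, List.map_map]
  refine List.map_congr_left (fun c _ => ?_)
  simp only [Function.comp, pvNorm]
  split_ifs <;> simp_all

lemma pvNorm_comma (c : Char) : (pvNorm c = ',') ↔ pvPauser c = true := by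
  unfold pvNorm pvPauser
  split_ifs <;> simp_all

lemma pvNorm_id (c : Char) (h : pvPauser c = false) : pvNorm c = c := by
  unfold pvPauser at h
  simp only [Bool.or_eq_false_iff, beq_eq_false_iff_ne, ne_eq] at h
  simp [pvNorm, h.1.2, h.2]

lemma pvSplitOn_go : ∀ (cs : List Char) (fuel : Nat) (cur : List Char) (acc : List (List Char)),
    cs.length < fuel →
    PySem.Chars.splitOn.go [','] fuel (cs.map pvNorm) cur acc
      = acc.reverse ++ ((cur.reverse ++ (pvSplit cs).1) :: (pvSplit cs).2) := by
  intro cs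
  induction cs with
  | nil =>
      intro fuel cur acc h
      cases fuel with
      | zero => simp at h
      | succ f => simp [PySem.Chars.splitOn.go, pvSplit]
  | cons c t ih =>
      intro fuel cur acc h
      cases fuel with
      | zero => simp at h
      | succ f =>
          have ht : t.length < f := by simpa [Nat.lt_succ_iff] using h
          by_cases hc : pvPauser c
          · have hn : pvNorm c = ',' := (pvNorm_comma c).mpr hc
            simp [PySem.Chars.splitOn.go, List.isPrefixOf, hn, ih f, ht, pvSplit, hc]
          · have hn : pvNorm c = c := pvNorm_id c (by simpa using hc)
            have hcc : ¬ ',' = c := by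
              intro hcc; rw [← hcc] at hc; simp [pvPauser] at hc
            simp [PySem.Chars.splitOn.go, List.isPrefixOf, hn, hcc, ih f, ht, pvSplit, hc]

lemma pvSplitOn_norm (s : List Char) :
    PySem.Chars.splitOn (s.map pvNorm) [','] = (pvSplit s).1 :: (pvSplit s).2 := by
  have : (s.map pvNorm).length = s.length := by simp
  simp [PySem.Chars.splitOn, this, pvSplitOn_go s (s.length + 1) [] [] (Nat.lt_succ_self _)]

-- A-side loop shape lemmas
lemma pvALoop_ge (cs : List Char) (i : Nat) (h : ¬ i < cs.length) : pvALoop cs i = true := by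
  unfold pvALoop; simp [h]

lemma pvALoop_shift (c : Char) (cs : List Char) (i : Nat) :
    pvALoop (c :: cs) (i+1) = pvALoop cs i := by
  generalize hn : cs.length - i = n
  induction n generalizing i with
  | zero =>
      rw [pvALoop_ge cs i (by omega), pvALoop_ge (c :: cs) (i+1) (by simp; omega)]
  | succ n ih =>
      have hi : i < cs.length := by omega
      have h0 : (i < cs.length) = True := by simp [hi]
      have h1 : (i + 1 < (c :: cs).length) = True := by
        simp only [List.length_cons, eq_iff_iff, iff_true]; omega
      have h2 : (i + 1 = (c :: cs).length - 1) = (i = cs.length - 1) := by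
        simp only [List.length_cons, eq_iff_iff]; omega
      have h3 : (i + 1 + 2 < (c :: cs).length) = (i + 2 < cs.length) := by
        simp only [List.length_cons, eq_iff_iff]; omega
      unfold pvALoop
      simp only [List.getD_cons_succ, h0, h1, h2, h3, if_true, ih (i+1) (by omega)]

lemma pvALoop_one (c : Char) : pvALoop [c] 0 = true := by
  rw [pvALoop]
  have h : pvALoop [c] (0+1) = true := pvALoop_ge _ _ (by simp)
  simp [h]

lemma pvALoop_cons2 (c d : Char) (rest : List Char) :
    pvALoop (c :: d :: rest) 0 =
      if pvPauser c then
        (((d == ' ') && ((decide (0 < rest.length)) && (rest.getD 0 ' ' != ' '))) && pvALoop (d :: rest) 0)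
      else pvALoop (d :: rest) 0 := by
  have h0 : (0 < (c :: d :: rest).length) = True := by
    simp only [List.length_cons, eq_iff_iff, iff_true]; omega
  have hlast : (0 = (c :: d :: rest).length - 1) = False := by
    simp only [List.length_cons, eq_iff_iff, iff_false]; omega
  have h3 : (0 + 2 < (c :: d :: rest).length) = (0 < rest.length) := by
    simp only [List.length_cons, eq_iff_iff]; omega
  rw [pvALoop]
  simp only [h0, hlast, h3, if_true, if_false,
    show ((0:Nat)+1) = 1 from rfl, show ((0:Nat)+2) = 2 from rfl,
    List.getD_cons_zero, List.getD_cons_succ,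
    show pvALoop (c :: d :: rest) 1 = pvALoop (d :: rest) 0 from pvALoop_shift ..]
  unfold pvPauser
  cases ((d == ' ') && ((decide (0 < rest.length)) && (rest.getD 0 ' ' != ' '))) <;> simp

lemma pvPauser_ne_space (c : Char) (h : pvPauser c = true) : (c == ' ') = false := by
  unfold pvPauser at h
  rcases (by simpa using h : (c = ',' ∨ c = ';') ∨ c = ':') with (h | h) | h <;> simp [h]

-- A's condition on the two chars after a pauser equals B's test of the next piece
lemma pvCond (d : Char) (rest : List Char) :
    ((d == ' ') && ((decide (0 < rest.length)) && (rest.getD 0 ' ' != ' ')))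
      = pvPieceOK (pvSplit (d :: rest)).1 (pvSplit (d :: rest)).2.isEmpty := by
  have hsp : pvPauser ' ' = false := by decide
  by_cases hd : pvPauser d
  · have := pvPauser_ne_space d hd
    simp [pvSplit, hd, pvPieceOK, this]
  · cases rest with
    | nil =>
        by_cases hds : d = ' ' <;> simp [pvSplit, hd, pvPieceOK, hds, hsp]
    | cons e r =>
        by_cases he : pvPauser e
        · have hes : ¬ e = ' ' := by simpa using pvPauser_ne_space e he
          by_cases hds : d = ' ' <;>
            simp [pvSplit, hd, he, pvPieceOK, hds, hes, hsp]
        · by_cases hds : d = ' ' <;> by_cases hes : e = ' ' <;>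
            simp [pvSplit, hd, he, pvPieceOK, hds, hes, hsp]

lemma pvMain (cs : List Char) : pvALoop cs 0 = pvBLoop (pvSplit cs).2 := by
  induction cs with
  | nil => simp [pvSplit, pvBLoop, pvALoop_ge]
  | cons c tail ih =>
      match tail with
      | [] =>
          by_cases hc : pvPauser c <;>
            simp [pvALoop_one, pvSplit, hc, pvBLoop, pvPieceOK]
      | d :: rest =>
          rw [pvALoop_cons2]
          by_cases hc : pvPauser c
          · simp only [hc, if_true, pvCond d rest, ih]
            show _ = pvBLoop (pvSplit (c :: d :: rest)).2
            simp [pvSplit, hc, pvBLoop]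
          · simp only [hc, ih]
            show _ = pvBLoop (pvSplit (c :: d :: rest)).2
            simp [pvSplit, hc]

-- ===== VERDICT (by name: the statement is the Claim_ definition above) =====
theorem ValidateStringPausers_spec : Claim_equal_ValidateStringPausers := by
  intro s _
  unfold Spec_ValidateStringPausers ValidateStringPausers ValidateStringPausers_alt
  rw [pvNorm_map, pvSplitOn_norm]
  simpa using pvMain s.toList
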